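-- pv_equiv track=rewrite | github.com/LoucasMaillet/school | college/python/2 - list vs dict/tp.py | plusFrequent
-- ===== SOURCE A (Python) =====
-- def plusFrequent(dic: dict, n: int) -> str:
--     """
--
--     Description
--     ----------
--     Find the dic's key with a 'n' length and the biggest value.
--
--     Parameters
--     ----------
--     dic : DICTIONNARY
--         Dict where you search.
--
--     n : INT
--         The key length.
--
--     Returns
--     -------
--     res : STRING
--         The result key.
--
--     """
--
--     res = ""
--     lastLen = 0
--
--     for k in dic:
--         if len(k) == n and dic[k] > lastLen:
--             lastLen = dic[k]
--             res = k
--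
--     return res
-- ===== SOURCE B (Python) =====
-- def plusFrequent(dic: dict, n: int) -> str:
--     # Phase 1: the largest value among length-n keys (0 if there are none).
--     m = max((dic[k] for k in dic if len(k) == n), default=0)
--     if m <= 0:
--         return ""
--     # Phase 2: the first key attaining that maximum (always found here).
--     for k in dic:
--         if len(k) == n and dic[k] == m:
--             return k
--     return ""
-- ===== Notes on version B (the rewrite author's own statement) =====
-- stated objective: alternative
-- what changed: Replaced A's single-pass loop with a running (best key, threshold) accumulator by a staged two-pass algorithm: first compute the maximum value over length-n keys, then linearly search for the first key attaining it (returning "" when the maximum is not positive).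
import Mathlib
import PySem

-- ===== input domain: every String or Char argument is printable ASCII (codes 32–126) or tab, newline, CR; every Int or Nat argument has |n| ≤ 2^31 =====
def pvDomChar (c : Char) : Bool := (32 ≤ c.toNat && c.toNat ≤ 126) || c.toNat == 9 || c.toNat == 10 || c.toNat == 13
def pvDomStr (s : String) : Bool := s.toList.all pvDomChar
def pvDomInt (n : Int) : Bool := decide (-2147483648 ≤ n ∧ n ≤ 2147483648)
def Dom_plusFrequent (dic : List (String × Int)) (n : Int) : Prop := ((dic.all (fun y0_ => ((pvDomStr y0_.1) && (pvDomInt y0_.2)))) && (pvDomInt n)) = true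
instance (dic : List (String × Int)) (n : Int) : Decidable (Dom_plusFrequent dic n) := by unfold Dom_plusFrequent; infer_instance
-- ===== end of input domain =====

-- B replaces A's single-pass running-(res, lastLen) loop by a staged two-pass algorithm
-- (compute the max value over length-n keys, then find the first key attaining it); alternative decomposition, same cost.


-- shared helper: the Python lookup dic[k] (first match); in both programs k is always a key of dic,
-- so get? is always `some` and the 0 default is never used
def pvGet (dic : List (String × Int)) (k : String) : Int :=
  ((PySem.Dict.mk dic).get? k).getD 0

-- ===== PORT A =====
-- for k in dic: if len(k) == n and dic[k] > lastLen: lastLen = dic[k]; res = k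
def plusFrequent (dic : List (String × Int)) (n : Int) : String :=
  (dic.foldl
    (fun (st : String × Int) kv =>
      if PySem.Str.len kv.1 = n ∧ st.2 < pvGet dic kv.1 then (kv.1, pvGet dic kv.1) else st)
    ("", 0)).1

-- ===== PORT B =====
-- m = max((dic[k] for k in dic if len(k)==n), default=0); if m <= 0: return "";
-- for k in dic: if len(k)==n and dic[k]==m: return k
def plusFrequent_alt (dic : List (String × Int)) (n : Int) : String :=
  let keys := dic.map Prod.fst
  let m := (PySem.List.max?
      ((keys.filter (fun k => decide (PySem.Str.len k = n))).map (pvGet dic))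
      (fun v => v)).getD 0
  if m ≤ 0 then ""
  else (keys.find? (fun k => decide (PySem.Str.len k = n) && decide (pvGet dic k = m))).getD ""

-- ===== PRECONDITION & SPEC =====
def Spec_plusFrequent (dic : List (String × Int)) (n : Int) (out : String) : Prop := out = plusFrequent_alt dic n
instance (dic : List (String × Int)) (n : Int) (out : String) : Decidable (Spec_plusFrequent dic n out) := by unfold Spec_plusFrequent; infer_instance

-- ===== CLAIM (what is proved, stated in full; the proofs are below) =====
def Claim_equal_plusFrequent : Prop := ∀ (dic : List (String × Int)) (n : Int), Dom_plusFrequent dic n → Spec_plusFrequent dic n (plusFrequent dic n)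

-- ===== LEMMAS AND PROOFS =====

-- A's loop step, over keys only, with lookup g and target length n
def pvStepA (g : String → Int) (n : Int) (st : String × Int) (k : String) : String × Int :=
  if PySem.Str.len k = n ∧ st.2 < g k then (k, g k) else st

-- the running maximum of g over length-n keys, seeded with v
def pvM (g : String → Int) (n : Int) (ks : List String) (v : Int) : Int :=
  ks.foldl (fun m k => if PySem.Str.len k = n then max m (g k) else m) v

theorem pvM_cons (g : String → Int) (n : Int) (k : String) (t : List String) (v : Int) :
    pvM g n (k :: t) v = pvM g n t (if PySem.Str.len k = n then max v (g k) else v) := rfl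

theorem pvFoldA_cons (g : String → Int) (n : Int) (st : String × Int) (k : String) (t : List String) :
    List.foldl (pvStepA g n) st (k :: t) = List.foldl (pvStepA g n) (pvStepA g n st k) t := rfl

-- the seed never exceeds the running maximum
theorem pvM_le (g : String → Int) (n : Int) :
    ∀ (ks : List String) (v : Int), v ≤ pvM g n ks v := by
  intro ks
  induction ks with
  | nil => intro v; exact le_refl v
  | cons k t ih =>
    intro v
    rw [pvM_cons]
    by_cases h : PySem.Str.len k = n
    · rw [if_pos h]
      exact le_trans (le_max_left v (g k)) (ih (max v (g k)))
    · rw [if_neg h]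
      exact ih v

-- if the maximum strictly exceeds the seed, some key attains it (find? succeeds)
theorem pvFind_some (g : String → Int) (n : Int) :
    ∀ (ks : List String) (v : Int), v < pvM g n ks v →
      ∃ x, ks.find? (fun k => decide (PySem.Str.len k = n) && decide (g k = pvM g n ks v)) = some x := by
  intro ks
  induction ks with
  | nil => intro v h; exact absurd h (lt_irrefl v)
  | cons k t ih =>
    intro v h
    by_cases hlen : PySem.Str.len k = n
    · have hM : pvM g n (k :: t) v = pvM g n t (max v (g k)) := by
        rw [pvM_cons, if_pos hlen]
      by_cases heq : g k = pvM g n (k :: t) v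
      · refine ⟨k, ?_⟩
        rw [List.find?_cons_of_pos]
        simp only [Bool.and_eq_true, decide_eq_true_eq]
        exact ⟨hlen, heq⟩
      · have hle : g k ≤ pvM g n (k :: t) v := by
          rw [hM]; exact le_trans (le_max_right v (g k)) (pvM_le g n t _)
        have hgk : g k < pvM g n (k :: t) v := lt_of_le_of_ne hle heq
        have hv' : max v (g k) < pvM g n t (max v (g k)) := by
          rw [← hM]; exact max_lt h hgk
        obtain ⟨x, hx⟩ := ih (max v (g k)) hv'
        refine ⟨x, ?_⟩
        rw [List.find?_cons_of_neg, hM]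
        · exact hx
        · simp only [Bool.and_eq_true, decide_eq_true_eq, not_and]
          exact fun _ => heq
    · have hM : pvM g n (k :: t) v = pvM g n t v := by
        rw [pvM_cons, if_neg hlen]
      obtain ⟨x, hx⟩ := ih v (hM ▸ h)
      refine ⟨x, ?_⟩
      rw [List.find?_cons_of_neg, hM]
      · exact hx
      · simp only [Bool.and_eq_true, decide_eq_true_eq, not_and]
        exact fun h' => absurd h' hlen

-- the first component of A's fold: the first key attaining the maximum (if it beats the seed)
theorem pvFold_fst (g : String → Int) (n : Int) :
    ∀ (ks : List String) (r : String) (v : Int),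
      (ks.foldl (pvStepA g n) (r, v)).1 =
        if v < pvM g n ks v then
          (ks.find? (fun k => decide (PySem.Str.len k = n) && decide (g k = pvM g n ks v))).getD r
        else r := by
  intro ks
  induction ks with
  | nil =>
    intro r v
    have h0 : pvM g n [] v = v := rfl
    rw [h0, if_neg (lt_irrefl v)]
    rfl
  | cons k t ih =>
    intro r v
    rw [pvFoldA_cons]
    by_cases hlen : PySem.Str.len k = n
    · have hM : pvM g n (k :: t) v = pvM g n t (max v (g k)) := by
        rw [pvM_cons, if_pos hlen]
      by_cases hgt : v < g k
      · have hmax : max v (g k) = g k := max_eq_right (le_of_lt hgt)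
        have hstep : pvStepA g n (r, v) k = (k, g k) := by
          unfold pvStepA; rw [if_pos ⟨hlen, hgt⟩]
        have hM' : pvM g n (k :: t) v = pvM g n t (g k) := by rw [hM, hmax]
        have hcond : v < pvM g n (k :: t) v :=
          lt_of_lt_of_le hgt (hM' ▸ pvM_le g n t (g k))
        rw [hstep, ih k (g k), if_pos hcond]
        by_cases heq : g k = pvM g n (k :: t) v
        · have hne : ¬ g k < pvM g n t (g k) := by rw [← hM', ← heq]; exact lt_irrefl _
          rw [if_neg hne, List.find?_cons_of_pos]
          · rfl
          · simp only [Bool.and_eq_true, decide_eq_true_eq]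
            exact ⟨hlen, heq⟩
        · have hlt : g k < pvM g n t (g k) :=
            lt_of_le_of_ne (pvM_le g n t (g k)) (hM' ▸ heq)
          rw [if_pos hlt, List.find?_cons_of_neg, hM']
          · obtain ⟨x, hx⟩ := pvFind_some g n t (g k) hlt
            rw [hx]; rfl
          · simp only [Bool.and_eq_true, decide_eq_true_eq, not_and]
            exact fun _ => heq
      · have hmax : max v (g k) = v := max_eq_left (le_of_not_gt hgt)
        have hstep : pvStepA g n (r, v) k = (r, v) := by
          unfold pvStepA; rw [if_neg (fun h => hgt h.2)]
        have hM' : pvM g n (k :: t) v = pvM g n t v := by rw [hM, hmax]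
        rw [hstep, ih r v, ← hM']
        by_cases hc : v < pvM g n (k :: t) v
        · rw [if_pos hc, if_pos hc, List.find?_cons_of_neg]
          simp only [Bool.and_eq_true, decide_eq_true_eq, not_and]
          intro _ hEq
          rw [hEq] at hgt
          exact hgt (lt_of_lt_of_le hc (le_refl _))
        · rw [if_neg hc, if_neg hc]
    · have hM : pvM g n (k :: t) v = pvM g n t v := by
        rw [pvM_cons, if_neg hlen]
      have hstep : pvStepA g n (r, v) k = (r, v) := by
        unfold pvStepA; rw [if_neg (fun h => hlen h.1)]
      rw [hstep, ih r v, ← hM, List.find?_cons_of_neg]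
      simp only [Bool.and_eq_true, decide_eq_true_eq, not_and]
      exact fun h' => absurd h' hlen

-- pvM is the fold of max over the filtered-and-mapped values
theorem pvM_eq_vals (g : String → Int) (n : Int) :
    ∀ (ks : List String) (v : Int),
      pvM g n ks v = ((ks.filter (fun k => decide (PySem.Str.len k = n))).map g).foldl max v := by
  intro ks
  induction ks with
  | nil => intro v; rfl
  | cons k t ih =>
    intro v
    by_cases hlen : PySem.Str.len k = n
    · have hf : (k :: t).filter (fun k => decide (PySem.Str.len k = n))
          = k :: t.filter (fun k => decide (PySem.Str.len k = n)) := by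
        rw [List.filter_cons, if_pos (decide_eq_true hlen)]
      rw [pvM_cons, if_pos hlen, hf, List.map_cons, List.foldl_cons]
      exact ih (max v (g k))
    · have hf : (k :: t).filter (fun k => decide (PySem.Str.len k = n))
          = t.filter (fun k => decide (PySem.Str.len k = n)) := by
        rw [List.filter_cons, if_neg (by simpa using hlen)]
      rw [pvM_cons, if_neg hlen, hf]
      exact ih v

-- foldl max splits off its seed
theorem pvFoldl_max_split :
    ∀ (vs : List Int) (a b : Int), vs.foldl max (max a b) = max a (vs.foldl max b) := by
  intro vs
  induction vs with
  | nil => intro a b; rfl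
  | cons x t ih =>
    intro a b
    simp only [List.foldl_cons, max_assoc]
    exact ih a (max b x)

-- ===== VERDICT (by name: the statement is the Claim_ definition above) =====
theorem plusFrequent_spec : Claim_equal_plusFrequent := by
  intro dic n _
  unfold Spec_plusFrequent plusFrequent
  have hmap : dic.foldl
      (fun (st : String × Int) kv =>
        if PySem.Str.len kv.1 = n ∧ st.2 < pvGet dic kv.1 then (kv.1, pvGet dic kv.1) else st)
      ("", 0)
      = (dic.map Prod.fst).foldl (pvStepA (pvGet dic) n) ("", 0) := by
    rw [List.foldl_map]; rfl
  have halt : plusFrequent_alt dic n =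
      (if ((PySem.List.max?
              (((dic.map Prod.fst).filter (fun k => decide (PySem.Str.len k = n))).map (pvGet dic))
              (fun v => v)).getD 0) ≤ 0 then ""
       else ((dic.map Prod.fst).find?
              (fun k => decide (PySem.Str.len k = n) && decide (pvGet dic k =
                (PySem.List.max?
                  (((dic.map Prod.fst).filter (fun k => decide (PySem.Str.len k = n))).map (pvGet dic))
                  (fun v => v)).getD 0))).getD "") := rfl
  rw [hmap, pvFold_fst (pvGet dic) n (dic.map Prod.fst) "" 0, halt]
  cases hvals : ((dic.map Prod.fst).filter (fun k => decide (PySem.Str.len k = n))).map (pvGet dic) with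
  | nil =>
    have hM0 : pvM (pvGet dic) n (dic.map Prod.fst) 0 = 0 := by
      rw [pvM_eq_vals, hvals]
      rfl
    rw [hM0, if_neg (lt_irrefl 0)]
    simp [PySem.List.max?]
  | cons v vs =>
    have hM0 : pvM (pvGet dic) n (dic.map Prod.fst) 0 = max 0 (vs.foldl max v) := by
      rw [pvM_eq_vals, hvals, List.foldl_cons]
      exact pvFoldl_max_split vs 0 v
    rw [PySem.List.max?_id_cons, Option.getD_some]
    by_cases hpos : vs.foldl max v ≤ 0
    · rw [if_pos hpos, if_neg]
      rw [hM0]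
      omega
    · have hMv : pvM (pvGet dic) n (dic.map Prod.fst) 0 = vs.foldl max v := by
        rw [hM0, max_eq_right (le_of_lt (lt_of_not_ge hpos))]
      rw [if_neg hpos, if_pos (by rw [hMv]; exact lt_of_not_ge hpos), hMv]
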